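-- pv_equiv track=rewrite | github.com/russtoku/uipa | uipa_org/theme/doc_utilities.py | _strip_contents_after
-- ===== SOURCE A (Python) =====
-- def _strip_contents_after(phrase, lines):
--     '''Returns lines before the line that contains the phrase'''
--     if not phrase:
--         return lines
--
--     start = 0
--     for (i, line) in enumerate(lines):
--         if line.find(phrase) > -1:
--             start = i
--
--     return lines[:start]
-- ===== SOURCE B (Python) =====
-- def _strip_contents_after(phrase, lines):
--     '''Returns lines before the line that contains the phrase'''
--     if not phrase:
--         return lines
--
--     for i, line in reversed(list(enumerate(lines))):
--         if phrase in line: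
--             return lines[:i]
--     return []
-- ===== Notes on version B (the rewrite author's own statement) =====
-- stated objective: alternative
-- what changed: B scans from the end and returns at the first (i.e. last-in-order) matching line, instead of A's full forward scan that keeps overwriting a start index; no-match yields [] as with A's default start=0.
import Mathlib
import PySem

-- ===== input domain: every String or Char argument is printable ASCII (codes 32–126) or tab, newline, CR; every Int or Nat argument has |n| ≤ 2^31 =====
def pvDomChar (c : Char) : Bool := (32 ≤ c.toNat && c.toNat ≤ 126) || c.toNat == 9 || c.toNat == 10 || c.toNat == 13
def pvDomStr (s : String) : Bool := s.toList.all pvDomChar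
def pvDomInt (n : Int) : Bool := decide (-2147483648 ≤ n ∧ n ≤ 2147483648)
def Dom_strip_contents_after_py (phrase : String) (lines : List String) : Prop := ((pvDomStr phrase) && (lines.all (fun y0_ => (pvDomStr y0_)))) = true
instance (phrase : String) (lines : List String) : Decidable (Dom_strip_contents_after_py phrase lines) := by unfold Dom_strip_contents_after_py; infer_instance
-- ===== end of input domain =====

-- B replaces A's full forward scan (overwriting a start index at every match) by a reverse scan
-- that returns at the first match from the end; same return value (alternative decomposition).

-- ===== PORT A =====
-- forward scan: start := last matching index (default 0), return lines[:start]
def strip_contents_after_py (phrase : String) (lines : List String) : List String :=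
  if phrase = "" then lines
  else
    let start : Int :=
      (PySem.List.enumerate lines 0).foldl
        (fun st p => if PySem.Str.find p.2 phrase > -1 then p.1 else st) 0
    PySem.List.slice lines none (some start)

-- ===== PORT B =====
-- reverse scan over reversed(list(enumerate(lines))): return lines[:i] at the first match, [] if none
def stripAfterGoB (phrase : String) (lines : List String) : List (Int × String) → List String
  | [] => []
  | (i, line) :: rest =>
    if PySem.Str.isIn phrase line then PySem.List.slice lines none (some i)
    else stripAfterGoB phrase lines rest

def strip_contents_after_py_alt (phrase : String) (lines : List String) : List String :=
  if phrase = "" then lines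
  else stripAfterGoB phrase lines (PySem.List.enumerate lines 0).reverse

-- ===== PRECONDITION & SPEC =====
def Spec_strip_contents_after_py (phrase : String) (lines : List String) (out : List String) : Prop := out = strip_contents_after_py_alt phrase lines
instance (phrase : String) (lines : List String) (out : List String) : Decidable (Spec_strip_contents_after_py phrase lines out) := by unfold Spec_strip_contents_after_py; infer_instance

-- ===== CLAIM (what is proved, stated in full; the proofs are below) =====
def Claim_equal_strip_contents_after_py : Prop := ∀ (phrase : String) (lines : List String), Dom_strip_contents_after_py phrase lines → Spec_strip_contents_after_py phrase lines (strip_contents_after_py phrase lines)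

-- ===== LEMMAS AND PROOFS =====

-- the two membership tests agree: line.find(phrase) > -1  ↔  phrase in line
theorem find_gt_iff_isIn (phrase line : String) :
    (PySem.Str.find line phrase > -1) ↔ PySem.Str.isIn phrase line = true := by
  rw [PySem.Str.isIn_iff_infix, ← PySem.Str.find_nonneg_iff]
  constructor <;> intro h <;> omega

-- B's reverse scan over l equals lines[:foldl over l.reverse] for any pair list l
theorem stripAfterGoB_eq (phrase : String) (lines : List String) (l : List (Int × String)) :
    stripAfterGoB phrase lines l =
      PySem.List.slice lines none
        (some (l.reverse.foldl
          (fun st p => if PySem.Str.find p.2 phrase > -1 then p.1 else st) 0)) := by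
  induction l with
  | nil => simp [stripAfterGoB, PySem.List.slice_to (b := (0 : Int)) (by omega)]
  | cons hd rest ih =>
    obtain ⟨i, line⟩ := hd
    simp only [stripAfterGoB, List.reverse_cons, List.foldl_append, List.foldl_cons,
      List.foldl_nil]
    by_cases h : PySem.Str.isIn phrase line = true
    · rw [if_pos h, if_pos ((find_gt_iff_isIn phrase line).mpr h)]
    · rw [if_neg h, if_neg (fun hc => h ((find_gt_iff_isIn phrase line).mp hc)), ih]

-- ===== VERDICT (by name: the statement is the Claim_ definition above) =====
theorem strip_contents_after_py_spec : Claim_equal_strip_contents_after_py := by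
  intro phrase lines _
  unfold Spec_strip_contents_after_py strip_contents_after_py strip_contents_after_py_alt
  by_cases h : phrase = ""
  · simp [h]
  · simp only [if_neg h, stripAfterGoB_eq, List.reverse_reverse]
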